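-- pv_equiv track=rewrite | github.com/thuhci/ANFC-Automated-Nailfold-Capillary | Flow_Velocity_Measurement/utils/utils_morph.py | _get_node_class
-- ===== SOURCE A (Python) =====
-- def _get_node_class(neighbor_ls, node):
--     node_class = ['endpoint','junction','normal','useless']
--     count = 0
--     rank = [(0,1),(1,1),(1,0),(1,-1),(0,-1),(-1,-1),(-1,0),(-1,1)]
--
--     if len(neighbor_ls) == 1:
--         # endpoint
--         return node_class[0]
--     elif len(neighbor_ls) == 2:
--         # normal or useless
--         for i in range(len(rank)):
--             if (rank[i][0]+node[0],rank[i][1]+node[1]) in neighbor_ls and (rank[(2+i)%len(rank)][0]+node[0],rank[(2+i)%len(rank)][1]+node[1]) in neighbor_ls: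
--                 # useless(c==2)
--                 return node_class[3]
--             if (rank[i][0]+node[0],rank[i][1]+node[1]) in neighbor_ls and (rank[(1+i)%len(rank)][0]+node[0],rank[(1+i)%len(rank)][1]+node[1]) not in neighbor_ls:
--                 count += 1
--         # c==1: useless, c==2: normal
--         return node_class[(count == 1)+2]
--     else:
--         for i in range(len(rank)):
--             if (rank[i][0]+node[0],rank[i][1]+node[1]) in neighbor_ls and (rank[(1+i)%len(rank)][0]+node[0],rank[(1+i)%len(rank)][1]+node[1]) not in neighbor_ls:
--                 count += 1
--         # neight>2 and count == 2: normal
--         return node_class[(count < 3)+1]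
-- ===== SOURCE B (Python) =====
-- _BIT = {(0, 1): 0, (1, 1): 1, (1, 0): 2, (1, -1): 3,
--         (0, -1): 4, (-1, -1): 5, (-1, 0): 6, (-1, 1): 7}
--
--
-- def _get_node_class(neighbor_ls, node):
--     if len(neighbor_ls) == 1:
--         return 'endpoint'
--     # encode the 8-neighbourhood as one bitmask by scanning the neighbour list
--     m = 0
--     for (x, y) in neighbor_ls:
--         i = _BIT.get((x - node[0], y - node[1]))
--         if i is not None:
--             m |= 1 << i
--     # classify with circular-shift bit arithmetic on the mask
--     rot1 = ((m >> 1) | (m << 7)) & 255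
--     transitions = bin(m & (rot1 ^ 255)).count('1')
--     if len(neighbor_ls) == 2:
--         rot2 = ((m >> 2) | (m << 6)) & 255
--         if m & rot2:
--             return 'useless'
--         return 'useless' if transitions == 1 else 'normal'
--     return 'normal' if transitions < 3 else 'junction'
-- ===== Notes on version B (the rewrite author's own statement) =====
-- stated objective: alternative
-- what changed: B scans the neighbour list once, encoding the 8-neighbourhood as a single bitmask via an offset-to-bit dict, and classifies with circular-shift bit arithmetic (opposite pair = m & rot2(m), transitions = popcount(m & ~rot1(m))), instead of A's per-direction membership scans with an early-return loop and a running counter.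
import Mathlib
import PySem

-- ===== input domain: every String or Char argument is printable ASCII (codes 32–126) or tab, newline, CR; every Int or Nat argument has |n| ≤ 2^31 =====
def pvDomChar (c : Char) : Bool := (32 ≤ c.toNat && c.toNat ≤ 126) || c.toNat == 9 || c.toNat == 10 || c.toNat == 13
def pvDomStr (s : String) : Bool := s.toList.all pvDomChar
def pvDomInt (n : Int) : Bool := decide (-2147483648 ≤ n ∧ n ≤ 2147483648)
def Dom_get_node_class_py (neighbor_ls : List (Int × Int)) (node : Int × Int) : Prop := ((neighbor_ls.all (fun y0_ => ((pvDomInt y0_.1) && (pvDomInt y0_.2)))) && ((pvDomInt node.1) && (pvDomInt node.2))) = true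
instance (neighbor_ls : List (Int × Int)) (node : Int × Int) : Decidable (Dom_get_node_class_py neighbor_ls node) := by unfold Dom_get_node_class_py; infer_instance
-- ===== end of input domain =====

-- B replaces A's per-direction membership scans by a single scan of the neighbour list that
-- encodes the 8-neighbourhood as one bitmask, then classifies with circular-shift bit
-- arithmetic (opposite pair = m & rot2(m); transitions = popcount(m & ~rot1(m))); objective: alternative algorithm.
-- ===== PORT A =====
-- rank-table index access: indices are always 0..7, so getD is exact
def pvRank : List (Int × Int) := [(0,1),(1,1),(1,0),(1,-1),(0,-1),(-1,-1),(-1,0),(-1,1)]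

def get_node_class_py (neighbor_ls : List (Int × Int)) (node : Int × Int) : String :=
  let node_class : List String := ["endpoint","junction","normal","useless"]
  let rank := pvRank
  if neighbor_ls.length == 1 then
    node_class.getD 0 ""
  else if neighbor_ls.length == 2 then
    let st := ([0,1,2,3,4,5,6,7] : List Nat).foldl (fun st i =>
      match st with
      | .inl s => .inl s
      | .inr count =>
        let p := rank.getD i (0,0)
        let q := rank.getD ((2+i) % 8) (0,0)
        let r := rank.getD ((1+i) % 8) (0,0)
        if neighbor_ls.contains (p.1+node.1, p.2+node.2) &&
           neighbor_ls.contains (q.1+node.1, q.2+node.2) then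
          .inl (node_class.getD 3 "")
        else if neighbor_ls.contains (p.1+node.1, p.2+node.2) &&
                !neighbor_ls.contains (r.1+node.1, r.2+node.2) then
          .inr (count+1)
        else .inr count) (Sum.inr 0)
    match st with
    | .inl s => s
    | .inr count => node_class.getD ((if count == 1 then 1 else 0) + 2) ""
  else
    let count := ([0,1,2,3,4,5,6,7] : List Nat).foldl (fun count i =>
      let p := rank.getD i (0,0)
      let r := rank.getD ((1+i) % 8) (0,0)
      if neighbor_ls.contains (p.1+node.1, p.2+node.2) &&
         !neighbor_ls.contains (r.1+node.1, r.2+node.2) then count+1 else count) 0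
    node_class.getD ((if count < 3 then 1 else 0) + 1) ""

-- ===== PORT B =====
-- the module-level _BIT dict of Source B
def pvBitTable : PySem.Dict (Int × Int) Nat :=
  PySem.Dict.ofList [((0,1),0),((1,1),1),((1,0),2),((1,-1),3),((0,-1),4),((-1,-1),5),((-1,0),6),((-1,1),7)]

-- `bin(x).count('1')` of Source B = popcount; PySem.Int.bitCount is Python's exact popcount for x ≥ 0
def get_node_class_py_alt (neighbor_ls : List (Int × Int)) (node : Int × Int) : String :=
  if neighbor_ls.length == 1 then "endpoint"
  else
    let m := neighbor_ls.foldl (fun m p =>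
      match pvBitTable.get? (p.1 - node.1, p.2 - node.2) with
      | some i => m ||| (1 <<< i)
      | none => m) (0 : Nat)
    let rot1 := ((m >>> 1) ||| (m <<< 7)) &&& 255
    let transitions := PySem.Int.bitCount (((m &&& (rot1 ^^^ 255)) : Nat) : Int)
    if neighbor_ls.length == 2 then
      if (m &&& (((m >>> 2) ||| (m <<< 6)) &&& 255)) != 0 then "useless"
      else if transitions == 1 then "useless" else "normal"
    else if transitions < 3 then "normal" else "junction"

-- ===== PRECONDITION & SPEC =====
def Spec_get_node_class_py (neighbor_ls : List (Int × Int)) (node : Int × Int) (out : String) : Prop := out = get_node_class_py_alt neighbor_ls node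
instance (neighbor_ls : List (Int × Int)) (node : Int × Int) (out : String) : Decidable (Spec_get_node_class_py neighbor_ls node out) := by unfold Spec_get_node_class_py; infer_instance

-- ===== CLAIM =====
def Claim_equal_get_node_class_py : Prop := ∀ (neighbor_ls : List (Int × Int)) (node : Int × Int), Dom_get_node_class_py neighbor_ls node → Spec_get_node_class_py neighbor_ls node (get_node_class_py neighbor_ls node)

-- ===== LEMMAS AND PROOFS =====
-- A as a function of the length and the 8 occupancy bits
def pvAbits (n : Nat) (bs : List Bool) : String :=
  let node_class : List String := ["endpoint","junction","normal","useless"]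
  if n == 1 then
    node_class.getD 0 ""
  else if n == 2 then
    let st := ([0,1,2,3,4,5,6,7] : List Nat).foldl (fun st i =>
      match st with
      | .inl s => .inl s
      | .inr count =>
        if bs.getD i false && bs.getD ((2+i) % 8) false then
          .inl (node_class.getD 3 "")
        else if bs.getD i false && !bs.getD ((1+i) % 8) false then
          .inr (count+1)
        else .inr count) (Sum.inr 0)
    match st with
    | .inl s => s
    | .inr count => node_class.getD ((if count == 1 then 1 else 0) + 2) ""
  else
    let count := ([0,1,2,3,4,5,6,7] : List Nat).foldl (fun count i =>
      if bs.getD i false && !bs.getD ((1+i) % 8) false then count+1 else count) 0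
    node_class.getD ((if count < 3 then 1 else 0) + 1) ""

-- B's classification tail as a function of the length and the mask
def pvBcore (n : Nat) (m : Nat) : String :=
  if n == 1 then "endpoint"
  else
    let rot1 := ((m >>> 1) ||| (m <<< 7)) &&& 255
    let transitions := PySem.Int.bitCount (((m &&& (rot1 ^^^ 255)) : Nat) : Int)
    if n == 2 then
      if (m &&& (((m >>> 2) ||| (m <<< 6)) &&& 255)) != 0 then "useless"
      else if transitions == 1 then "useless" else "normal"
    else if transitions < 3 then "normal" else "junction"

-- B's mask-building scan
def pvStep (node : Int × Int) (m : Nat) (p : Int × Int) : Nat :=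
  match pvBitTable.get? (p.1 - node.1, p.2 - node.2) with
  | some i => m ||| (1 <<< i)
  | none => m

def pvMaskOf (ns : List (Int × Int)) (node : Int × Int) : Nat := ns.foldl (pvStep node) 0

-- the 8 occupancy bits, A-side view
def pvBits (ns : List (Int × Int)) (node : Int × Int) : List Bool :=
  pvRank.map (fun d => ns.contains (d.1+node.1, d.2+node.2))

theorem A_eq (ns : List (Int × Int)) (node : Int × Int) :
    get_node_class_py ns node = pvAbits ns.length (pvBits ns node) := rfl

theorem B_eq (ns : List (Int × Int)) (node : Int × Int) :
    get_node_class_py_alt ns node = pvBcore ns.length (pvMaskOf ns node) := rfl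

-- the dict lookup as an if-chain
theorem tblget (q : Int × Int) : pvBitTable.get? q =
    (if q = (0,1) then some 0 else if q = (1,1) then some 1 else if q = (1,0) then some 2
     else if q = (1,-1) then some 3 else if q = (0,-1) then some 4 else if q = (-1,-1) then some 5
     else if q = (-1,0) then some 6 else if q = (-1,1) then some 7 else none) := by
  simp only [pvBitTable, PySem.Dict.get?, PySem.Dict.ofList, PySem.Dict.update, PySem.Dict.empty,
    PySem.Dict.insert]
  split_ifs with h1 h2 h3 h4 h5 h6 h7 h8 <;> simp_all
  exact ⟨Ne.symm h1, Ne.symm h2, Ne.symm h3, Ne.symm h4, Ne.symm h5, Ne.symm h6, Ne.symm h7, Ne.symm h8⟩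

theorem tblget_lt (q : Int × Int) (i : Nat) (h : pvBitTable.get? q = some i) : i < 8 := by
  rw [tblget] at h
  split_ifs at h <;> simp_all <;> omega

theorem maskStep_lt (node : Int × Int) : ∀ (ns : List (Int × Int)) (m : Nat), m < 256 →
    ns.foldl (pvStep node) m < 256 := by
  intro ns
  induction ns with
  | nil => intro m hm; simpa using hm
  | cons p ns ih =>
    intro m hm
    refine ih _ ?_
    unfold pvStep
    cases h : pvBitTable.get? (p.1 - node.1, p.2 - node.2) with
    | none => exact hm
    | some j =>
      have hj : j < 8 := tblget_lt _ _ h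
      have hx : 1 <<< j < 256 := by interval_cases j <;> decide
      show m ||| (1 <<< j) < 2 ^ 8
      exact Nat.or_lt_two_pow hm hx

theorem mask_lt (ns : List (Int × Int)) (node : Int × Int) : pvMaskOf ns node < 256 :=
  maskStep_lt node ns 0 (by decide)

theorem testBit_foldStep (node : Int × Int) (ns : List (Int × Int)) (m : Nat) (i : Nat) :
    (ns.foldl (pvStep node) m).testBit i =
      (m.testBit i || ns.any (fun p => pvBitTable.get? (p.1 - node.1, p.2 - node.2) == some i)) := by
  induction ns generalizing m with
  | nil => simp
  | cons p ns ih =>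
    simp only [List.foldl_cons, List.any_cons, ih]
    cases h : pvBitTable.get? (p.1 - node.1, p.2 - node.2) with
    | none => simp [pvStep, h]
    | some j =>
      have hd : (j == i) = decide (j = i) := by by_cases hji : j = i <;> simp [hji]
      simp [pvStep, h, Nat.testBit_or, Nat.one_shiftLeft, Nat.testBit_two_pow, Bool.or_assoc, hd]

theorem shift_beq (p node k : Int × Int) :
    (((p.1 - node.1, p.2 - node.2) : Int × Int) == k) = (p == (k.1 + node.1, k.2 + node.2)) := by
  rcases p with ⟨a, b⟩; rcases k with ⟨k1, k2⟩; rcases node with ⟨n1, n2⟩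
  rw [Bool.eq_iff_iff]
  simp only [beq_iff_eq, Prod.mk.injEq]
  omega

set_option maxHeartbeats 1000000 in
theorem tbl_some (q : Int × Int) : ∀ (i : Nat) (k1 k2 : Int),
    (i, k1, k2) ∈ ([(0,0,1),(1,1,1),(2,1,0),(3,1,-1),(4,0,-1),(5,-1,-1),(6,-1,0),(7,-1,1)] :
      List (Nat × Int × Int)) →
    ((pvBitTable.get? q == some i) = (q == (k1, k2))) := by
  intro i k1 k2 hm
  simp only [List.mem_cons, List.not_mem_nil, or_false, Prod.mk.injEq] at hm
  rcases hm with ⟨rfl, rfl, rfl⟩ | ⟨rfl, rfl, rfl⟩ | ⟨rfl, rfl, rfl⟩ | ⟨rfl, rfl, rfl⟩ |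
    ⟨rfl, rfl, rfl⟩ | ⟨rfl, rfl, rfl⟩ | ⟨rfl, rfl, rfl⟩ | ⟨rfl, rfl, rfl⟩ <;>
    (rw [tblget]; split_ifs <;> simp_all)

theorem any_pred_eq (ns : List (Int × Int)) (node : Int × Int) (i : Nat) (k : Int × Int)
    (hk : ∀ q : Int × Int, (pvBitTable.get? q == some i) = (q == k)) :
    (ns.any fun p => pvBitTable.get? (p.1 - node.1, p.2 - node.2) == some i) =
      ns.contains (k.1 + node.1, k.2 + node.2) := by
  rw [Bool.eq_iff_iff]
  simp [hk, shift_beq]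

set_option maxRecDepth 16384 in
theorem key (n : Nat) (m : Nat) (hm : m < 256) :
    pvAbits n [m.testBit 0, m.testBit 1, m.testBit 2, m.testBit 3,
               m.testBit 4, m.testBit 5, m.testBit 6, m.testBit 7] = pvBcore n m := by
  by_cases h1 : n = 1
  · subst h1; rfl
  · by_cases h2 : n = 2
    · subst h2
      revert hm; revert m; decide
    · have ha : pvAbits n = pvAbits 3 := by
        funext bs; simp [pvAbits, h1, h2]
      have hb : pvBcore n = pvBcore 3 := by
        funext m'; simp [pvBcore, h1, h2]
      rw [ha, hb]
      revert hm; revert m; decide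

theorem bits_eq (ns : List (Int × Int)) (node : Int × Int) :
    pvBits ns node = [(pvMaskOf ns node).testBit 0, (pvMaskOf ns node).testBit 1,
      (pvMaskOf ns node).testBit 2, (pvMaskOf ns node).testBit 3, (pvMaskOf ns node).testBit 4,
      (pvMaskOf ns node).testBit 5, (pvMaskOf ns node).testBit 6, (pvMaskOf ns node).testBit 7] := by
  have base : ∀ (i : Nat) (k1 k2 : Int),
      (∀ q : Int × Int, (pvBitTable.get? q == some i) = (q == (k1, k2))) →
      (pvMaskOf ns node).testBit i = ns.contains (k1 + node.1, k2 + node.2) := by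
    intro i k1 k2 hk
    rw [pvMaskOf, testBit_foldStep, any_pred_eq ns node i (k1, k2) hk]
    simp
  simp only [pvBits, pvRank, List.map, List.cons.injEq]
  exact ⟨(base 0 0 1 (fun q => tbl_some q 0 0 1 (by decide))).symm,
         (base 1 1 1 (fun q => tbl_some q 1 1 1 (by decide))).symm,
         (base 2 1 0 (fun q => tbl_some q 2 1 0 (by decide))).symm,
         (base 3 1 (-1) (fun q => tbl_some q 3 1 (-1) (by decide))).symm,
         (base 4 0 (-1) (fun q => tbl_some q 4 0 (-1) (by decide))).symm,
         (base 5 (-1) (-1) (fun q => tbl_some q 5 (-1) (-1) (by decide))).symm,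
         (base 6 (-1) 0 (fun q => tbl_some q 6 (-1) 0 (by decide))).symm,
         (base 7 (-1) 1 (fun q => tbl_some q 7 (-1) 1 (by decide))).symm, trivial⟩

-- ===== VERDICT =====
theorem get_node_class_py_spec : Claim_equal_get_node_class_py := by
  intro ns node _
  unfold Spec_get_node_class_py
  rw [A_eq, B_eq, bits_eq, key _ _ (mask_lt ns node)]
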